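-- pv_equiv track=rewrite | github.com/romiteld/ZohoDealCreation | app/admin/import_deals.py | classify_company
-- ===== SOURCE A (Python) =====
-- def classify_company(company_name: str) -> str:
--     """Classify company as National or Independent firm"""
--     if not company_name:
--         return "Independent firm"
--
--     # National firm indicators
--     national_indicators = [
--         'LPL', 'Raymond James', 'Ameriprise', 'Edward Jones',
--         'Wells Fargo', 'Morgan Stanley', 'Merrill Lynch',
--         'UBS', 'Charles Schwab', 'Fidelity', 'Vanguard',
--         'Northwestern Mutual', 'MassMutual', 'Prudential'
--     ]
--
--     company_lower = company_name.lower()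
--     for indicator in national_indicators:
--         if indicator.lower() in company_lower:
--             return "National firm"
--
--     return "Independent firm"
-- ===== SOURCE B (Python) =====
-- _NATIONAL_SET = frozenset([
--     'lpl', 'raymond james', 'ameriprise', 'edward jones',
--     'wells fargo', 'morgan stanley', 'merrill lynch',
--     'ubs', 'charles schwab', 'fidelity', 'vanguard',
--     'northwestern mutual', 'massmutual', 'prudential'
-- ])
-- _LENGTHS = sorted({len(ind) for ind in _NATIONAL_SET})
--
-- def classify_company(company_name: str) -> str:
--     """Classify by hashing windows: for each indicator length, slide a window over
--     the lowered name and look the window up in a frozenset of indicators."""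
--     if not company_name:
--         return "Independent firm"
--     s = company_name.lower()
--     n = len(s)
--     if any(s[i:i+L] in _NATIONAL_SET
--            for L in _LENGTHS
--            for i in range(n - L + 1)):
--         return "National firm"
--     return "Independent firm"
-- ===== Notes on version B (the rewrite author's own statement) =====
-- stated objective: alternative
-- what changed: B replaces A's per-indicator substring searches with a windowed hash-set lookup: it collects the distinct indicator lengths, slides a window of each such length over the lowered name once, and tests each window for membership in a frozenset of lowered indicators.
import Mathlib
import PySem

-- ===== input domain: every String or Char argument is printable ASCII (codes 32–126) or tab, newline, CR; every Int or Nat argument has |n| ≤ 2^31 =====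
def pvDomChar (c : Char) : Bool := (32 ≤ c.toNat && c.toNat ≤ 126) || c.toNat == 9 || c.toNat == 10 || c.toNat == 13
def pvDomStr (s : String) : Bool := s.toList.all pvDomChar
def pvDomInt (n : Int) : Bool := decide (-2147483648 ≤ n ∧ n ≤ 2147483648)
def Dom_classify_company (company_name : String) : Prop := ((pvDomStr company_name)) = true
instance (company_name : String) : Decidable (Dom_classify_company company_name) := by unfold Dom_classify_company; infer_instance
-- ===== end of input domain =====

-- B replaces A's per-indicator substring searches by sliding fixed-length windows over the
-- lowered name and looking each window up in a hash set of indicators (objective: alternative).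

-- ===== PORT A =====
def aNationalIndicators : List String :=
  ["LPL", "Raymond James", "Ameriprise", "Edward Jones",
   "Wells Fargo", "Morgan Stanley", "Merrill Lynch",
   "UBS", "Charles Schwab", "Fidelity", "Vanguard",
   "Northwestern Mutual", "MassMutual", "Prudential"]

-- the 'for indicator in national_indicators: if indicator.lower() in company_lower: return …' loop
def aLoop (inds : List String) (companyLower : String) : String :=
  match inds with
  | [] => "Independent firm"
  | ind :: rest =>
      if PySem.Str.isIn (PySem.Str.lower ind) companyLower then "National firm"
      else aLoop rest companyLower

def classify_company (company_name : String) : String :=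
  if company_name = "" then "Independent firm"
  else aLoop aNationalIndicators (PySem.Str.lower company_name)

-- ===== PORT B =====
-- frozenset of the lowered indicators (as char lists: Str ops are defined over List Char)
def bIndSet : PySem.Set (List Char) :=
  PySem.Set.ofList
    (["lpl", "raymond james", "ameriprise", "edward jones",
      "wells fargo", "morgan stanley", "merrill lynch",
      "ubs", "charles schwab", "fidelity", "vanguard",
      "northwestern mutual", "massmutual", "prudential"].map String.toList)

-- _LENGTHS = sorted({len(ind) for ind in _NATIONAL_SET})
def bLengths : List Int :=
  PySem.List.sorted (PySem.Set.ofList (bIndSet.map (fun w => (w.length : Int)))) (fun x => x) false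

def classify_company_alt (company_name : String) : String :=
  if company_name = "" then "Independent firm"
  else
    let cs := PySem.Chars.lower company_name.toList
    let n : Int := cs.length
    if bLengths.any (fun L =>
         (PySem.List.pyRange 0 (n - L + 1) 1).any (fun i =>
           PySem.Set.contains bIndSet (PySem.List.slice cs (some i) (some (i + L)))))
    then "National firm" else "Independent firm"

-- ===== PRECONDITION & SPEC =====
def Spec_classify_company (company_name : String) (out : String) : Prop := out = classify_company_alt company_name
instance (company_name : String) (out : String) : Decidable (Spec_classify_company company_name out) := by unfold Spec_classify_company; infer_instance

-- ===== CLAIM (what is proved, stated in full; the proofs are below) =====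
def Claim_equal_classify_company : Prop := ∀ (company_name : String), Dom_classify_company company_name → Spec_classify_company company_name (classify_company company_name)

-- ===== LEMMAS AND PROOFS =====

-- A's loop returns "National firm" iff some lowered indicator is an infix of the lowered name.
theorem aLoop_eq (inds : List String) (low : String) :
    aLoop inds low =
      if ∃ ind ∈ inds, PySem.Chars.lower ind.toList <:+: low.toList
      then "National firm" else "Independent firm" := by
  induction inds with
  | nil => simp [aLoop]
  | cons ind rest ih =>
      simp only [aLoop, ih, PySem.Str.isIn_iff_infix]
      by_cases h : PySem.Chars.lower ind.toList <:+: low.toList <;> simp [h]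

-- every indicator length is positive and is listed in bLengths
theorem bLengths_pos : ∀ L ∈ bLengths, 0 < L := by decide
theorem bInd_length_mem : ∀ w ∈ bIndSet, (w.length : Int) ∈ bLengths := by decide

-- B's window test is true iff some indicator of the set is an infix.
theorem bCond_iff (cs : List Char) :
    (bLengths.any (fun L =>
        (PySem.List.pyRange 0 ((cs.length : Int) - L + 1) 1).any (fun i =>
          PySem.Set.contains bIndSet (PySem.List.slice cs (some i) (some (i + L))))) = true)
      ↔ ∃ w ∈ bIndSet, w <:+: cs := by
  simp only [List.any_eq_true, PySem.Set.contains_iff, PySem.List.mem_pyRange_one]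
  constructor
  · rintro ⟨L, hL, i, ⟨hi0, _⟩, hmem⟩
    refine ⟨_, hmem, ?_⟩
    have hL0 : (0 : Int) ≤ L := le_of_lt (bLengths_pos L hL)
    rw [PySem.List.slice_toNat cs hi0 (by omega)]
    exact ((cs.drop i.toNat).take_prefix _).isInfix.trans (cs.drop_suffix i.toNat).isInfix
  · rintro ⟨w, hw, s, t, hst⟩
    refine ⟨(w.length : Int), bInd_length_mem w hw, (s.length : Int), ⟨by positivity, ?_⟩, ?_⟩
    · have : s.length + w.length ≤ cs.length := by
        rw [← hst]; simp
      omega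
    · rw [PySem.List.slice_natCast_add cs]
      rw [← hst, List.append_assoc, List.drop_left, List.take_left]
      exact hw

-- the two indicator collections agree after lowering A's
theorem inds_lower_eq :
    aNationalIndicators.map (fun ind => PySem.Chars.lower ind.toList) = bIndSet := by decide

theorem exists_inds_iff (cs : List Char) :
    (∃ ind ∈ aNationalIndicators, PySem.Chars.lower ind.toList <:+: cs)
      ↔ ∃ w ∈ bIndSet, w <:+: cs := by
  constructor
  · rintro ⟨ind, hmem, hinf⟩
    exact ⟨_, inds_lower_eq ▸ List.mem_map_of_mem hmem, hinf⟩
  · rintro ⟨w, hw, hinf⟩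
    rcases List.mem_map.mp (inds_lower_eq ▸ hw : w ∈ aNationalIndicators.map _) with ⟨ind, hmem, heq⟩
    exact ⟨ind, hmem, heq ▸ hinf⟩

-- ===== VERDICT (by name: the statement is the Claim_ definition above) =====
theorem classify_company_spec : Claim_equal_classify_company := by
  intro s _hdom
  unfold Spec_classify_company classify_company classify_company_alt
  by_cases hs : s = ""
  · simp [hs]
  · simp only [hs, if_false]
    rw [aLoop_eq]
    have hcs : (PySem.Str.lower s).toList = PySem.Chars.lower s.toList := PySem.Str.toList_lower s
    by_cases h : ∃ w ∈ bIndSet, w <:+: PySem.Chars.lower s.toList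
    · rw [if_pos (hcs ▸ (exists_inds_iff _).mpr h), if_pos ((bCond_iff _).mpr h)]
    · rw [if_neg (fun hc => h ((exists_inds_iff _).mp (hcs ▸ hc))),
          if_neg (fun hc => h ((bCond_iff _).mp hc))]
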